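-- pv_equiv track=rewrite | github.com/didrikfo/quiverMutation | quiverMutation.py | pathHasZeroRel
-- ===== SOURCE A (Python) =====
-- def sublistExists(list, sublist):
--     for i in range(len(list)-len(sublist)+1):
--         if sublist == list[i:i+len(sublist)]:
--             return True #return position (i) if you wish
--     return False
--
-- def pathHasZeroRel(path, relSet):
--     hasZeroRel = False
--     for rel in relSet:
--         if len(rel) == 1:
--             if sublistExists(path, rel[0]):
--                 hasZeroRel = True
--                 break
--     return hasZeroRel
-- ===== SOURCE B (Python) =====
-- def pathHasZeroRel(path, relSet):
--     pats = {tuple(rel[0]) for rel in relSet if len(rel) == 1}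
--     lengths = {len(p) for p in pats}
--     windows = {tuple(path[i:i+L]) for L in lengths for i in range(len(path) - L + 1)}
--     return not pats.isdisjoint(windows)
-- ===== Notes on version B (the rewrite author's own statement) =====
-- stated objective: alternative
-- what changed: Instead of per-relation naive slice scans with early break, B collects all singleton-relation patterns into a hash set, builds one set of all path windows for each distinct pattern length, and answers by a set-disjointness test.
import Mathlib
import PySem

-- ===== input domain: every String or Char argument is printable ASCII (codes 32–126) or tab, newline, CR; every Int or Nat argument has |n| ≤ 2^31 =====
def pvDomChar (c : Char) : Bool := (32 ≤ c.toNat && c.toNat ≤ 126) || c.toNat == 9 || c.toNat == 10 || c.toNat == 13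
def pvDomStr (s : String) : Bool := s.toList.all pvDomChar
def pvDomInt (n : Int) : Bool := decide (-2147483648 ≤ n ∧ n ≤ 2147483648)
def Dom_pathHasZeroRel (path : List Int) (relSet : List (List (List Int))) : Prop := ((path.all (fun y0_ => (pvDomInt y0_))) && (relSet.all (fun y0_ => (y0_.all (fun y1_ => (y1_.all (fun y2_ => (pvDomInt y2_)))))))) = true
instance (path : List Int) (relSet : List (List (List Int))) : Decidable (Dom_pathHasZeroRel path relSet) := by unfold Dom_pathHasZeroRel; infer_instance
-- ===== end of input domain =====

-- B replaces A's per-relation naive scan (with early break) by a set-based formulation: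
-- one set of singleton patterns, one set of path windows per distinct pattern length, one disjointness test.

-- ===== PORT A =====
-- sublistExists(list, sublist): scan every start index, compare the slice.
def sublistExistsA (l : List Int) (sub : List Int) : Bool :=
  (PySem.List.pyRange 0 ((l.length : Int) - (sub.length : Int) + 1) 1).any
    (fun i => sub == PySem.List.slice l (some i) (some (i + (sub.length : Int))))

-- for rel in relSet: if len(rel)==1 and sublistExists(path, rel[0]): True, break
def pathHasZeroRel (path : List Int) (relSet : List (List (List Int))) : Bool :=
  relSet.any (fun rel =>
    if rel.length = 1 then sublistExistsA path (rel.headD []) else false)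

-- ===== PORT B =====
def pathHasZeroRel_alt (path : List Int) (relSet : List (List (List Int))) : Bool :=
  let pats : PySem.Set (List Int) :=
    PySem.Set.ofList (relSet.filterMap (fun rel =>
      if rel.length = 1 then some (rel.headD []) else none))
  let lengths : PySem.Set Int := PySem.Set.ofList (pats.map (fun p => (p.length : Int)))
  let windows : PySem.Set (List Int) :=
    PySem.Set.ofList (lengths.flatMap (fun L =>
      (PySem.List.pyRange 0 ((path.length : Int) - L + 1) 1).map
        (fun i => PySem.List.slice path (some i) (some (i + L)))))
  !(PySem.Set.isdisjoint pats windows)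

-- ===== PRECONDITION & SPEC =====
def Spec_pathHasZeroRel (path : List Int) (relSet : List (List (List Int))) (out : Bool) : Prop := out = pathHasZeroRel_alt path relSet
instance (path : List Int) (relSet : List (List (List Int))) (out : Bool) : Decidable (Spec_pathHasZeroRel path relSet out) := by unfold Spec_pathHasZeroRel; infer_instance

-- ===== CLAIM (what is proved, stated in full; the proofs are below) =====
def Claim_equal_pathHasZeroRel : Prop := ∀ (path : List Int) (relSet : List (List (List Int))), Dom_pathHasZeroRel path relSet → Spec_pathHasZeroRel path relSet (pathHasZeroRel path relSet)

-- ===== LEMMAS AND PROOFS =====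

-- a window slice taken at a valid start index has exactly the requested length
lemma window_length (path : List Int) (L : Nat) (i : Int) (h0 : 0 ≤ i)
    (h1 : i + (L : Int) ≤ (path.length : Int)) :
    (PySem.List.slice path (some i) (some (i + (L : Int)))).length = L := by
  lift i to ℕ using h0 with j
  rw [PySem.List.slice_natCast_add]
  simp only [List.length_take, List.length_drop]
  omega

lemma subA_iff (path p : List Int) :
    sublistExistsA path p = true ↔
      ∃ i : Int, 0 ≤ i ∧ i + (p.length : Int) ≤ (path.length : Int) ∧
        p = PySem.List.slice path (some i) (some (i + (p.length : Int))) := by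
  unfold sublistExistsA
  rw [List.any_eq_true]
  constructor
  · rintro ⟨i, hi, hb⟩
    rw [PySem.List.mem_pyRange_one] at hi
    exact ⟨i, hi.1, by omega, by simpa using hb⟩
  · rintro ⟨i, h0, h1, he⟩
    exact ⟨i, PySem.List.mem_pyRange_one.mpr ⟨h0, by omega⟩, by simpa using he⟩

lemma memPats_iff (relSet : List (List (List Int))) (p : List Int) :
    p ∈ PySem.Set.ofList (relSet.filterMap (fun rel =>
        if rel.length = 1 then some (rel.headD []) else none)) ↔
      ∃ rel ∈ relSet, rel.length = 1 ∧ rel.headD [] = p := by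
  rw [PySem.Set.mem_ofList, List.mem_filterMap]
  constructor
  · rintro ⟨rel, hm, hf⟩
    by_cases h : rel.length = 1
    · refine ⟨rel, hm, h, ?_⟩
      simpa [h] using hf
    · simp [h] at hf
  · rintro ⟨rel, hm, h1, hp⟩
    refine ⟨rel, hm, ?_⟩
    simpa [h1] using hp

-- ===== VERDICT (by name: the statement is the Claim_ definition above) =====
theorem pathHasZeroRel_spec : Claim_equal_pathHasZeroRel := by
  unfold Claim_equal_pathHasZeroRel Spec_pathHasZeroRel
  intro path relSet _
  unfold pathHasZeroRel pathHasZeroRel_alt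
  rw [Bool.eq_iff_iff]
  rw [List.any_eq_true, Bool.not_eq_true', ← Bool.not_eq_true, ← ne_eq,
      Ne, PySem.Set.isdisjoint_iff]
  push Not
  constructor
  · rintro ⟨rel, hm, hr⟩
    rw [Bool.if_false_right, Bool.and_eq_true, decide_eq_true_iff] at hr
    obtain ⟨h1, hs⟩ := hr
    set p := rel.headD [] with hp
    obtain ⟨i, h0, hle, he⟩ := (subA_iff path p).mp hs
    refine ⟨p, (memPats_iff relSet p).mpr ⟨rel, hm, h1, rfl⟩, ?_⟩
    rw [PySem.Set.mem_ofList, List.mem_flatMap]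
    refine ⟨(p.length : Int), ?_, ?_⟩
    · rw [PySem.Set.mem_ofList, List.mem_map]
      exact ⟨p, (memPats_iff relSet p).mpr ⟨rel, hm, h1, rfl⟩, rfl⟩
    · rw [List.mem_map]
      exact ⟨i, PySem.List.mem_pyRange_one.mpr ⟨h0, by omega⟩, he.symm⟩
  · rintro ⟨p, hp, hw⟩
    rw [PySem.Set.mem_ofList, List.mem_flatMap] at hw
    obtain ⟨L, hL, hmap⟩ := hw
    rw [PySem.Set.mem_ofList, List.mem_map] at hL
    obtain ⟨q, _, rfl⟩ := hL
    rw [List.mem_map] at hmap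
    obtain ⟨i, hir, he⟩ := hmap
    rw [PySem.List.mem_pyRange_one] at hir
    obtain ⟨rel, hm, h1, hp'⟩ := (memPats_iff relSet p).mp hp
    refine ⟨rel, hm, ?_⟩
    rw [Bool.if_false_right, Bool.and_eq_true, decide_eq_true_iff]
    refine ⟨h1, ?_⟩
    rw [hp', subA_iff]
    have hLen : p.length = q.length := by
      rw [← he]; exact window_length path q.length i hir.1 (by omega)
    exact ⟨i, hir.1, by omega, by rw [show ((p.length : Int)) = (q.length : Int) by exact_mod_cast hLen, ← he]⟩
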